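-- pv_equiv track=rewrite | github.com/qjazk0000/SKN13_boooms | Algorithms/week3/BAEKJOON_chicken coupon.py | solution
-- ===== SOURCE A (Python) =====
-- def solution(n, k):
--     answer = n  # 먹을 수 있는 총 치킨 수
--     coupons = n  # 얻을 수 있는 총 쿠폰 수
--     while coupons >= k: # k보다 작을 시 더 이상 치킨 주문 X
--         free = coupons // k
--         answer += free
--         coupons = (coupons % k) + free
--     return answer
-- ===== SOURCE B (Python) =====
-- def solution(n, k):
--     # Closed form: each redeemed batch of k coupons nets a cost of k-1 coupons
--     # per free chicken, so the total number of free chickens is (n-1)//(k-1).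
--     if n < k:
--         return n  # not enough coupons for any redemption
--     if k < 2:
--         raise ValueError("coupon exchange requires k >= 2")
--     return n + (n - 1) // (k - 1)
-- ===== Notes on version B (the rewrite author's own statement) =====
-- stated objective: faster
-- what changed: Replaced the coupon-redemption simulation loop by the closed form n + (n-1)//(k-1) (each free chicken consumes exactly k-1 coupons net).
-- outside the precondition, e.g. on solution(5, -2): A returns 2, B raises ValueError; on solution(5, 1): A does not finish within the time limit, B raises ValueError; on solution(7, 0): A raises ZeroDivisionError, B raises ValueError
import Mathlib
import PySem

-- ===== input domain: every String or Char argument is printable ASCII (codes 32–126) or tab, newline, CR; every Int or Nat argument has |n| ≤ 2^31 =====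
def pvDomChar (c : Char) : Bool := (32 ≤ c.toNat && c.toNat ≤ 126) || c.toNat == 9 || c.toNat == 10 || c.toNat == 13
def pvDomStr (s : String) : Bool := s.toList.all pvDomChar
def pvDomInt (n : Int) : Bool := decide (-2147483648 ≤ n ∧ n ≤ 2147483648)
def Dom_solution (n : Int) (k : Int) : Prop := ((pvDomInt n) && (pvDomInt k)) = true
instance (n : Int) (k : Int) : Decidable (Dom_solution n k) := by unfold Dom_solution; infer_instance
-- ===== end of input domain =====

-- B replaces A's coupon-redemption simulation loop by the closed form n + (n-1)//(k-1) (O(1) instead of O(log n)).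


-- ===== PORT A =====
-- A's while loop: state (answer, coupons); the dite guard adds 2 ≤ k only to make the
-- recursion terminate in Lean — inside Pre_solution the loop body is reached exactly when
-- Python's 'coupons >= k' is true.
def solutionLoop (k answer coupons : Int) : Int :=
  if _h : k ≤ coupons ∧ 2 ≤ k then
    solutionLoop k (answer + PySem.Int.floordiv coupons k)
                   (PySem.Int.mod coupons k + PySem.Int.floordiv coupons k)
  else answer
termination_by coupons.toNat
decreasing_by
  obtain ⟨hkc, hk2⟩ := _h
  have hq : 1 ≤ PySem.Int.floordiv coupons k := by
    rw [PySem.Int.le_floordiv_iff_mul_le (by omega)]; omega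
  have hr : 0 ≤ PySem.Int.mod coupons k := PySem.Int.mod_nonneg _ (by omega)
  have h1 := PySem.Int.floordiv_mul_add_mod coupons k
  have hlt : PySem.Int.mod coupons k + PySem.Int.floordiv coupons k + 1 ≤ coupons := by
    nlinarith [hq, hr, h1]
  omega

def solution (n : Int) (k : Int) : Int := solutionLoop k n n

-- ===== PORT B =====
-- The 'k < 2' branch is where Source B raises ValueError (outside Pre_solution); the port
-- returns a placeholder 0 there, never reached inside Pre_solution.
def solution_alt (n : Int) (k : Int) : Int :=
  if n < k then n
  else if k < 2 then 0
  else n + PySem.Int.floordiv (n - 1) (k - 1)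

-- ===== PRECONDITION & SPEC =====
-- Pre_ excludes k ≤ 1 with n ≥ k: there A either diverges (k = 1), raises ZeroDivisionError
-- (k = 0 with n ≥ 0), or (k < 0) returns values produced by floor division with a negative
-- coupon count k — outside the coupon problem's domain; B raises ValueError on all of them.
def Pre_solution (n : Int) (k : Int) : Prop := n < k ∨ 2 ≤ k
instance (n : Int) (k : Int) : Decidable (Pre_solution n k) := by unfold Pre_solution; infer_instance
def pvWitness_solution : Int × Int := (10, 3)

def Spec_solution (n : Int) (k : Int) (out : Int) : Prop := out = solution_alt n k
instance (n : Int) (k : Int) (out : Int) : Decidable (Spec_solution n k out) := by unfold Spec_solution; infer_instance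

-- ===== CLAIM (what is proved, stated in full; the proofs are below) =====
def Claim_equal_solution : Prop := ∀ (n : Int) (k : Int), Dom_solution n k → Pre_solution n k → Spec_solution n k (solution n k)

-- ===== LEMMAS AND PROOFS =====

-- Loop invariant: for k ≥ 2 and coupons ≥ 1 the loop adds exactly (coupons-1)/(k-1) to answer.
lemma solutionLoop_closed (k : Int) (hk : 2 ≤ k) :
    ∀ (m : Nat) (c : Int), c.toNat = m → 1 ≤ c → ∀ a, solutionLoop k a c = a + (c - 1) / (k - 1) := by
  intro m
  induction m using Nat.strong_induction_on with
  | _ m ih =>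
    intro c hm hc a
    rw [solutionLoop]
    by_cases hkc : k ≤ c
    · rw [dif_pos ⟨hkc, hk⟩]
      set q := PySem.Int.floordiv c k with hqdef
      set r := PySem.Int.mod c k with hrdef
      have hq : 1 ≤ q := by
        rw [hqdef, PySem.Int.le_floordiv_iff_mul_le (by omega)]; omega
      have hr : 0 ≤ r := PySem.Int.mod_nonneg _ (by omega)
      have h1 : q * k + r = c := PySem.Int.floordiv_mul_add_mod c k
      have hdec : r + q + 1 ≤ c := by nlinarith [hq, hr, h1]
      rw [ih (r + q).toNat (by omega) (r + q) rfl (by omega)]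
      have hsplit : c - 1 = (r + q - 1) + q * (k - 1) := by linear_combination -h1
      rw [hsplit, Int.add_mul_ediv_right _ _ (by omega : k - 1 ≠ 0)]
      ring
    · rw [dif_neg (by tauto)]
      have : (c - 1) / (k - 1) = 0 := Int.ediv_eq_zero_of_lt (by omega) (by omega)
      omega

-- ===== VERDICT (by name: the statement is the Claim_ definition above) =====
theorem solution_spec : Claim_equal_solution := by
  intro n k _ hpre
  unfold Spec_solution solution solution_alt
  by_cases hnk : n < k
  · rw [solutionLoop, dif_neg (by omega), if_pos hnk]
  · have hk2 : 2 ≤ k := by rcases hpre with h | h <;> omega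
    rw [if_neg hnk, if_neg (by omega : ¬ k < 2),
        solutionLoop_closed k hk2 n.toNat n rfl (by omega) n,
        PySem.Int.floordiv_eq_ediv_of_pos (by omega)]
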